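-- pv_equiv track=rewrite | github.com/IrinaZhit/signals_2025 | 1/3.py | nn_decode
-- ===== SOURCE A (Python) =====
-- def xor_vec(a, b):
--     return tuple(x ^ y for x, y in zip(a, b))
--
-- def wt(v):
--     return sum(v)
--
-- def hamming(a, b):
--     return wt(xor_vec(a, b))
--
-- def nn_decode(r, codewords):
--     best = None
--     best_d = None
--     for c in codewords:
--         d = hamming(r, c)
--         if best_d is None or d < best_d:
--             best_d = d
--             best = c
--         elif d == best_d:
--             best = None  # неоднозначно (ничья)
--     return best, best_d
-- ===== SOURCE B (Python) =====
-- def nn_decode(r, codewords):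
--     pairs = [(c, sum(x ^ y for x, y in zip(r, c))) for c in codewords]
--     if not pairs:
--         return None, None
--     m = min(d for _, d in pairs)
--     if sum(1 for _, d in pairs if d == m) > 1:
--         return None, m
--     return next(c for c, d in pairs if d == m), m
-- ===== Notes on version B (the rewrite author's own statement) =====
-- stated objective: alternative
-- what changed: A's single pass keeps a running minimum distance plus a tie flag interleaved in one loop state; B first materializes all (codeword, distance) pairs, then takes the minimum distance, then counts how many codewords attain it, returning the first attaining codeword only when the count is 1.
import Mathlib
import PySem

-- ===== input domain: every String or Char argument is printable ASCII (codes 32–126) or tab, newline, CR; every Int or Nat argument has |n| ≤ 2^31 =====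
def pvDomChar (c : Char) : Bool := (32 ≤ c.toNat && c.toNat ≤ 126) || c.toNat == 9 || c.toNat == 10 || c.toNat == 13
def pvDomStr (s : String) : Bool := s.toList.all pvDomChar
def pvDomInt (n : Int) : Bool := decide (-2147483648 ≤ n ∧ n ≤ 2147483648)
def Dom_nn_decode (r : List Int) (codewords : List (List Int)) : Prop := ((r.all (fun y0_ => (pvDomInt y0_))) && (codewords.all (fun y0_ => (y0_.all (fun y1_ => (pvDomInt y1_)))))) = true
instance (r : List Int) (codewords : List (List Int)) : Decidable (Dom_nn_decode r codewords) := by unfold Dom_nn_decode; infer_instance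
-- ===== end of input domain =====

-- B replaces A's interleaved running-min-with-tie-flag loop by a compute-all-pairs,
-- then min, then count, then first-match decomposition (objective: alternative).

-- ===== PORT A =====
def xor_vec (a b : List Int) : List Int :=
  (a.zip b).map (fun p => PySem.Int.bxor p.1 p.2)

def wt (v : List Int) : Int := v.sum

def hamming (a b : List Int) : Int := wt (xor_vec a b)

-- loop body of A's for-loop, as a helper
def nnStep (r : List Int) (st : Option (List Int) × Option Int) (c : List Int) :
    Option (List Int) × Option Int :=
  let d := hamming r c
  match st.2 with
  | none => (some c, some d)
  | some bd => if d < bd then (some c, some d) else if d = bd then (none, some bd) else st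

def nn_decode (r : List Int) (codewords : List (List Int)) : Option (List Int) × Option Int :=
  codewords.foldl (nnStep r) (none, none)

-- ===== PORT B =====
def nn_decode_alt (r : List Int) (codewords : List (List Int)) : Option (List Int) × Option Int :=
  let pairs := codewords.map (fun c => (c, ((r.zip c).map (fun p => PySem.Int.bxor p.1 p.2)).sum))
  if pairs.isEmpty then (none, none)
  else
    match PySem.List.min? (pairs.map Prod.snd) (fun y => y) with
    | none => (none, none)   -- unreachable: pairs nonempty
    | some m =>
      if 1 < pairs.countP (fun p => p.2 == m) then (none, some m)
      else ((pairs.find? (fun p => p.2 == m)).map Prod.fst, some m)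

-- ===== PRECONDITION & SPEC =====
def Spec_nn_decode (r : List Int) (codewords : List (List Int)) (out : Option (List Int) × Option Int) : Prop := out = nn_decode_alt r codewords
instance (r : List Int) (codewords : List (List Int)) (out : Option (List Int) × Option Int) : Decidable (Spec_nn_decode r codewords out) := by unfold Spec_nn_decode; infer_instance

-- ===== CLAIM (what is proved, stated in full; the proofs are below) =====
def Claim_equal_nn_decode : Prop := ∀ (r : List Int) (codewords : List (List Int)), Dom_nn_decode r codewords → Spec_nn_decode r codewords (nn_decode r codewords)

-- ===== LEMMAS AND PROOFS =====

-- closed-form description of A's loop state after processing cs from state (b0, some d0)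
def gMin (h : List Int → Int) (d0 : Int) (cs : List (List Int)) : Int :=
  cs.foldl (fun a c => min a (h c)) d0

def gRes (h : List Int → Int) (b0 : Option (List Int)) (d0 : Int) (cs : List (List Int)) :
    Option (List Int) × Option Int :=
  ((if (if d0 = gMin h d0 cs then 1 else 0) + cs.countP (fun c => h c == gMin h d0 cs) = 1
    then (if d0 = gMin h d0 cs then b0 else cs.find? (fun c => h c == gMin h d0 cs))
    else none), some (gMin h d0 cs))

lemma gMin_le (h : List Int → Int) :
    ∀ (cs : List (List Int)) (a : Int), gMin h a cs ≤ a := by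
  intro cs
  induction cs with
  | nil => intro a; simp [gMin]
  | cons c t ih =>
    intro a
    calc gMin h a (c :: t)
        = gMin h (min a (h c)) t := rfl
      _ ≤ min a (h c) := ih _
      _ ≤ a := min_le_left _ _

lemma gMin_cons (h : List Int → Int) (d0 : Int) (c : List Int) (cs : List (List Int)) :
    gMin h d0 (c :: cs) = gMin h (min d0 (h c)) cs := rfl

lemma gRes_nil (h : List Int → Int) (b0 : Option (List Int)) (d0 : Int) :
    gRes h b0 d0 [] = (b0, some d0) := by
  simp [gRes, gMin]

lemma gRes_cons (h : List Int → Int) (b0 : Option (List Int)) (d0 : Int) (c : List Int)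
    (cs : List (List Int)) :
    gRes h b0 d0 (c :: cs) =
      if h c < d0 then gRes h (some c) (h c) cs
      else if h c = d0 then gRes h none d0 cs
      else gRes h b0 d0 cs := by
  rcases lt_trichotomy (h c) d0 with h1 | h1 | h1
  · -- new strict minimum seed
    have hmin : min d0 (h c) = h c := min_eq_right h1.le
    have hmle : gMin h (h c) cs ≤ h c := gMin_le h cs (h c)
    rw [if_pos h1]
    simp only [gRes, gMin_cons, hmin, List.countP_cons]
    by_cases hcm : h c = gMin h (h c) cs
    · have hb : (h c == gMin h (h c) cs) = true := beq_iff_eq.mpr hcm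
      rw [List.find?_cons_of_pos (p := fun c1 => h c1 == gMin h (h c) cs) hb, hb]
      simp only [Prod.mk.injEq]
      refine ⟨?_, trivial⟩
      split_ifs <;> first | rfl | omega
    · have hb : (h c == gMin h (h c) cs) = false := by
        simp only [beq_eq_false_iff_ne, ne_eq]; exact hcm
      rw [List.find?_cons_of_neg (p := fun c1 => h c1 == gMin h (h c) cs) (by simp [hb]), hb]
      simp only [Prod.mk.injEq]
      refine ⟨?_, trivial⟩
      split_ifs <;> first | rfl | omega | (exfalso; omega)
  · -- tie with the current best distance
    have hmin : min d0 (h c) = d0 := by omega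
    rw [if_neg (by omega), if_pos h1]
    simp only [gRes, gMin_cons, hmin, List.countP_cons]
    by_cases hcm : d0 = gMin h d0 cs
    · have hb : (h c == gMin h d0 cs) = true := beq_iff_eq.mpr (h1.trans hcm)
      rw [List.find?_cons_of_pos (p := fun c1 => h c1 == gMin h d0 cs) hb, hb]
      simp only [Prod.mk.injEq]
      refine ⟨?_, trivial⟩
      split_ifs <;> first | rfl | omega
    · have hb : (h c == gMin h d0 cs) = false := by
        simp only [beq_eq_false_iff_ne, ne_eq, h1]; exact hcm
      rw [List.find?_cons_of_neg (p := fun c1 => h c1 == gMin h d0 cs) (by simp [hb]), hb]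
      simp only [Prod.mk.injEq]
      refine ⟨?_, trivial⟩
      split_ifs <;> first | rfl | omega | (exfalso; omega)
  · -- strictly worse: state unchanged
    have hmin : min d0 (h c) = d0 := min_eq_left h1.le
    have hmle : gMin h d0 cs ≤ d0 := gMin_le h cs d0
    rw [if_neg (by omega), if_neg (by omega)]
    simp only [gRes, gMin_cons, hmin, List.countP_cons]
    have hb : (h c == gMin h d0 cs) = false := by
      simp only [beq_eq_false_iff_ne, ne_eq]; omega
    rw [List.find?_cons_of_neg (p := fun c1 => h c1 == gMin h d0 cs) (by simp [hb]), hb]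
    simp only [Prod.mk.injEq]
    refine ⟨?_, trivial⟩
    split_ifs <;> first | rfl | omega | (exfalso; omega)

lemma loop_eq (r : List Int) :
    ∀ (cs : List (List Int)) (b0 : Option (List Int)) (d0 : Int),
      cs.foldl (nnStep r) (b0, some d0) = gRes (hamming r) b0 d0 cs := by
  intro cs
  induction cs with
  | nil => intro b0 d0; simp [gRes_nil]
  | cons c t ih =>
    intro b0 d0
    rw [gRes_cons]
    show t.foldl (nnStep r) (nnStep r (b0, some d0) c) = _
    simp only [nnStep]
    by_cases h1 : hamming r c < d0
    · simp [h1, ih]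
    · by_cases h2 : hamming r c = d0
      · simp [h2, ih]
      · simp [h1, h2, ih]

lemma alt_eq (r : List Int) (c : List Int) (cs : List (List Int)) :
    nn_decode_alt r (c :: cs) = gRes (hamming r) (some c) (hamming r c) cs := by
  have hfun : (fun c' : List Int =>
      (c', ((r.zip c').map (fun p => PySem.Int.bxor p.1 p.2)).sum))
      = (fun c' : List Int => (c', hamming r c')) := rfl
  unfold nn_decode_alt
  simp only [hfun, List.map_cons, List.isEmpty_cons, List.map_map, Bool.false_eq_true,
    if_false, Function.comp_def]
  rw [PySem.List.min?_id_cons, List.foldl_map]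
  have hM : List.foldl (fun x y => min x (hamming r y)) (hamming r c) cs
      = gMin (hamming r) (hamming r c) cs := rfl
  rw [hM]
  show (if 1 < List.countP (fun p => p.2 == gMin (hamming r) (hamming r c) cs)
            ((c, hamming r c) :: List.map (fun c' => (c', hamming r c')) cs) then
        ((none : Option (List Int)), some (gMin (hamming r) (hamming r c) cs))
      else
        (Option.map Prod.fst
            (List.find? (fun p => p.2 == gMin (hamming r) (hamming r c) cs)
              ((c, hamming r c) :: List.map (fun c' => (c', hamming r c')) cs)),
          some (gMin (hamming r) (hamming r c) cs)))
      = gRes (hamming r) (some c) (hamming r c) cs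
  have hcount : List.countP (fun p => p.2 == gMin (hamming r) (hamming r c) cs)
        ((c, hamming r c) :: List.map (fun c' => (c', hamming r c')) cs)
      = List.countP (fun c' => hamming r c' == gMin (hamming r) (hamming r c) cs) cs
        + (if (hamming r c == gMin (hamming r) (hamming r c) cs) = true then 1 else 0) := by
    simp [List.countP_cons, List.countP_map, Function.comp_def]
  have hmem : gMin (hamming r) (hamming r c) cs ∈ (hamming r c :: cs.map (hamming r)) :=
    PySem.List.min?_mem (m := gMin (hamming r) (hamming r c) cs)
      (by rw [PySem.List.min?_id_cons, List.foldl_map]; rfl)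
  by_cases hcm : hamming r c = gMin (hamming r) (hamming r c) cs
  · have hb : (hamming r c == gMin (hamming r) (hamming r c) cs) = true := beq_iff_eq.mpr hcm
    rw [hcount, hb,
      List.find?_cons_of_pos
        (p := fun q : List Int × Int => q.2 == gMin (hamming r) (hamming r c) cs) hb]
    simp only [gRes, Option.map_some, if_pos hcm]
    split_ifs <;> first | rfl | omega
  · have hb : (hamming r c == gMin (hamming r) (hamming r c) cs) = false := by
      simp only [beq_eq_false_iff_ne, ne_eq]; exact hcm
    have hmem' : gMin (hamming r) (hamming r c) cs ∈ cs.map (hamming r) := by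
      rcases List.mem_cons.mp hmem with h' | h'
      · exact absurd h'.symm hcm
      · exact h'
    have hpos : 0 < List.countP (fun c' => hamming r c' == gMin (hamming r) (hamming r c) cs) cs := by
      rcases List.mem_map.mp hmem' with ⟨c', hc', he⟩
      refine List.countP_pos_iff.mpr ⟨c', hc', ?_⟩
      exact beq_iff_eq.mpr he
    have hfind : List.find? (fun p => p.2 == gMin (hamming r) (hamming r c) cs)
          ((c, hamming r c) :: List.map (fun c' => (c', hamming r c')) cs)
        = (List.find? (fun c' => hamming r c' == gMin (hamming r) (hamming r c) cs) cs).map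
            (fun c' => (c', hamming r c')) := by
      rw [List.find?_cons_of_neg (p := fun q : List Int × Int => q.2 == gMin (hamming r) (hamming r c) cs)
        (by simp [hb]), List.find?_map]
      rfl
    rw [hcount, hb, hfind]
    simp only [gRes, Option.map_map, if_neg hcm]
    have hfst : (Prod.fst ∘ fun c' : List Int => (c', hamming r c'))
        = (fun c' : List Int => c') := rfl
    rw [hfst]
    simp only [Option.map_id_fun', id, Bool.false_eq_true, if_false, Nat.zero_add]
    split_ifs <;> first | rfl | omega

-- ===== VERDICT (by name: the statement is the Claim_ definition above) =====
theorem nn_decode_spec : Claim_equal_nn_decode := by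
  intro r codewords _
  unfold Spec_nn_decode
  cases codewords with
  | nil => rfl
  | cons c cs =>
    rw [alt_eq]
    show cs.foldl (nnStep r) (nnStep r (none, none) c) = _
    exact loop_eq r cs (some c) (hamming r c)
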